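-- pv_equiv track=rewrite | github.com/heliumman/AdventOfCode | 2020/python/day20B.py | search_image
-- ===== SOURCE A (Python) =====
-- def search_image(image, sm):
--     dim = (len(sm[0]), len(sm))
--     count = 0
--
--     j = 0
--     while j < len(image[0]) - (dim[0] - 1):
--         i = 0
--         while i < len(image) - (dim[1] - 1):
--
--             tmp = []
--             l = 0
--             while l < dim[1]:
--                 tmp.append(''.join(image[i + l][j:j + dim[0]]))
--                 l = l + 1
--
--             if has_monster(tmp, sm):
--                 count = count + 1
--                 l = 0
--                 while l < dim[1]:
--                     m = 0
--                     while m < dim[0]: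
--
--                         if list(sm[l])[m] == '#':
--                             image[i + l][j + m] = 'O'
--
--                         m = m + 1
--                     l = l + 1
--
--             i = i + 1
--         j = j + 1
--
--     return (image, count)
--
-- def has_monster(image, sm):
--     hashes = 0
--     matches = 0
--
--     i = 0
--     while i < len(image):
--         j = 0
--         while j < len(list(image[0])):
--
--             if list(sm[i])[j] == '#':
--                 hashes = hashes + 1
--                 if list(image[i])[j] == '#':
--                     matches = matches + 1
--
--             j = j + 1
--         i = i + 1
--
--     return hashes == matches
-- ===== SOURCE B (Python) =====
-- # B: precompute the '#' offsets of the monster once; test/mark each window directly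
-- # through those offsets (no per-window string joining, no hash/match counting).
-- # Like A, mutates `image` in place (cells of found monsters become 'O').
-- def search_image(image, sm):
--     h, w = len(sm), len(sm[0])
--     coords = [(r, c) for r in range(h) for c in range(w) if sm[r][c] == '#']
--     count = 0
--     for j in range(len(image[0]) - w + 1):
--         for i in range(len(image) - h + 1):
--             if all(image[i + r][j + c] == '#' for (r, c) in coords):
--                 count += 1
--                 for (r, c) in coords:
--                     image[i + r][j + c] = 'O'
--     return (image, count)
-- ===== Notes on version B (the rewrite author's own statement) =====
-- stated objective: simpler
-- what changed: B precomputes the list of (row,col) offsets of '#' cells in the monster once and tests/marks each window by reading those cells of the live image directly, replacing A's per-window string-window construction (slicing + joining every window row) and the hash/match double-counting helper has_monster with a single all() over the offset list.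
-- outside the precondition, e.g. on search_image([['', '#']], ['##']): A returns ([['O', 'O']], 1), B returns ([['', '#']], 0); on search_image([['#']], ['##', '#']): A returns ([['#']], 0), B raises IndexError
import Mathlib
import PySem

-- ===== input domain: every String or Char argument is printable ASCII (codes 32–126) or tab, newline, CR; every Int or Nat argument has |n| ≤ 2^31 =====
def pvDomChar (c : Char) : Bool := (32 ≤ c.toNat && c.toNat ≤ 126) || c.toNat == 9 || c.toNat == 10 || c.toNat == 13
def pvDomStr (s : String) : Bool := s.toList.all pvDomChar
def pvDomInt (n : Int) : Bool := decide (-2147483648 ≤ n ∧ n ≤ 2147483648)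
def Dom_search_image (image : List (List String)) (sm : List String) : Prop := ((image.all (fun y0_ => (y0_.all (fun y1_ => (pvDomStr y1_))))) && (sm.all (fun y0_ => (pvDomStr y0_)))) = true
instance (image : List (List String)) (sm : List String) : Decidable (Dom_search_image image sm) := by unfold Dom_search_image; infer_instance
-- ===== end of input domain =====

-- B replaces A's per-window string slicing/joining and hash/match counting helper by a
-- precomputed list of '#' offsets tested and marked directly on the (live) image; objective:
-- simpler. Python A and B both mutate `image` in place identically; the theorem is about the
-- returned value (which contains the mutated grid).


-- ===== PORT A =====
def hasMonsterA (img sm : List String) : Bool :=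
  let st := (PySem.List.pyRange 0 (PySem.List.len img) 1).foldl (fun (st : Int × Int) i =>
    (PySem.List.pyRange 0 (PySem.List.len (PySem.List.pyGetD img 0 "").toList) 1).foldl (fun (st : Int × Int) j =>
      if PySem.List.pyGetD (PySem.List.pyGetD sm i "").toList j ' ' == '#' then
        (st.1 + 1, if PySem.List.pyGetD (PySem.List.pyGetD img i "").toList j ' ' == '#' then st.2 + 1 else st.2)
      else st) st) ((0 : Int), (0 : Int))
  st.1 == st.2

def search_image (image : List (List String)) (sm : List String) : List (List String) × Int :=
  let dim : Int × Int := (PySem.Str.len (PySem.List.pyGetD sm 0 ""), PySem.List.len sm)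
  (PySem.List.pyRange 0 (PySem.List.len (PySem.List.pyGetD image 0 []) - (dim.1 - 1)) 1).foldl (fun st j =>
    (PySem.List.pyRange 0 (PySem.List.len image - (dim.2 - 1)) 1).foldl (fun (st : List (List String) × Int) i =>
      let img := st.1
      let tmp : List String := (PySem.List.pyRange 0 dim.2 1).foldl (fun tmp l =>
        tmp ++ [PySem.Str.join "" (PySem.List.slice (PySem.List.pyGetD img (i + l) []) (some j) (some (j + dim.1)))]) []
      if hasMonsterA tmp sm then
        let img' := (PySem.List.pyRange 0 dim.2 1).foldl (fun im l =>
          (PySem.List.pyRange 0 dim.1 1).foldl (fun im m =>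
            if PySem.List.pyGetD (PySem.List.pyGetD sm l "").toList m ' ' == '#' then
              PySem.List.pySetD im (i + l) (PySem.List.pySetD (PySem.List.pyGetD im (i + l) []) (j + m) "O")
            else im) im) img
        (img', st.2 + 1)
      else (img, st.2)) st) (image, 0)

-- ===== PORT B =====
def search_image_alt (image : List (List String)) (sm : List String) : List (List String) × Int :=
  let h : Int := PySem.List.len sm
  let w : Int := PySem.Str.len (PySem.List.pyGetD sm 0 "")
  let coords : List (Int × Int) :=
    (PySem.List.pyRange 0 h 1).flatMap (fun r =>
      ((PySem.List.pyRange 0 w 1).filter (fun c =>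
        PySem.List.pyGetD (PySem.List.pyGetD sm r "").toList c ' ' == '#')).map (fun c => (r, c)))
  (PySem.List.pyRange 0 (PySem.List.len (PySem.List.pyGetD image 0 []) - w + 1) 1).foldl (fun st j =>
    (PySem.List.pyRange 0 (PySem.List.len image - h + 1) 1).foldl (fun (st : List (List String) × Int) i =>
      if coords.all (fun rc => PySem.List.pyGetD (PySem.List.pyGetD st.1 (i + rc.1) []) (j + rc.2) "" == "#") then
        (coords.foldl (fun im rc =>
           PySem.List.pySetD im (i + rc.1) (PySem.List.pySetD (PySem.List.pyGetD im (i + rc.1) []) (j + rc.2) "O")) st.1,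
         st.2 + 1)
      else st) st) (image, 0)

-- ===== PRECONDITION & SPEC =====
-- Pre_ requires nonempty image and monster (else Python raises IndexError) and sm rows at least
-- as long as sm[0] (else has_monster — and B's coords comprehension — raises IndexError; on
-- degenerate grids with empty loop ranges A happens to return (image,0) there while B's
-- comprehension still raises, so these stay excluded). Beyond that it
-- excludes grids that are ragged or have non-single-character cells although A can still return
-- on some of them: there A's joined window string can be shorter than the monster, silently
-- truncating the has_monster scan — an artefact of A's implementation on which B's natural
-- direct cell reads give a different (and on some such inputs no, IndexError) result. Grids
-- whose loop ranges are empty (too small for the monster, or a zero-width monster) are admitted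
-- unconditionally since no cell is ever probed.
def Pre_search_image (image : List (List String)) (sm : List String) : Prop :=
  image ≠ [] ∧ sm ≠ [] ∧
  (∀ s ∈ sm, (sm.getD 0 "").toList.length ≤ s.toList.length) ∧
  (image.length < sm.length ∨
   (image.getD 0 []).length < (sm.getD 0 "").toList.length ∨
   (sm.getD 0 "").toList.length = 0 ∨
   (∀ row ∈ image, (image.getD 0 []).length ≤ row.length ∧ ∀ cell ∈ row, cell.toList.length = 1))
instance (image : List (List String)) (sm : List String) : Decidable (Pre_search_image image sm) := by
  unfold Pre_search_image; infer_instance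

def pvWitness_search_image : List (List String) × List String :=
  ([[".", "#"], ["#", "#"]], ["##"])

def Spec_search_image (image : List (List String)) (sm : List String) (out : List (List String) × Int) : Prop := out = search_image_alt image sm
instance (image : List (List String)) (sm : List String) (out : List (List String) × Int) : Decidable (Spec_search_image image sm out) := by unfold Spec_search_image; infer_instance

-- ===== CLAIM (what is proved, stated in full; the proofs are below) =====
def Claim_equal_search_image : Prop := ∀ (image : List (List String)) (sm : List String), Dom_search_image image sm → Pre_search_image image sm → Spec_search_image image sm (search_image image sm)

-- ===== LEMMAS AND PROOFS =====

theorem pyRange_nonpos (N : Int) (h : N ≤ 0) : PySem.List.pyRange 0 N 1 = [] := by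
  rw [PySem.List.pyRange_of_pos 0 N (by norm_num)]
  simp [show ¬ (0 : Int) < N by omega]

theorem countP_and_eq_iff {α : Type} (l : List α) (p q : α → Bool) :
    (l.countP p = l.countP (fun x => p x && q x)) ↔ ∀ x ∈ l, p x = true → q x = true := by
  induction l with
  | nil => simp
  | cons a t ih =>
    have hle := List.countP_mono_left (l := t) (p := fun x => p x && q x) (q := p)
      (fun a _ h => by simp at h; exact h.1)
    rw [List.countP_cons, List.countP_cons]
    cases hpa : p a <;> cases hqa : q a <;> simp [hpa, hqa, ih] <;> omega

theorem sum_range_eq_iff (n : Nat) (f g : Nat → Nat) (hle : ∀ i < n, g i ≤ f i) :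
    (((List.range n).map f).sum = ((List.range n).map g).sum) ↔ ∀ i < n, f i = g i := by
  induction n with
  | zero => simp
  | succ k ih =>
    have hs : ∀ m : Nat → Nat, ((List.range (k+1)).map m).sum = ((List.range k).map m).sum + m k := by
      intro m; rw [List.range_succ]; simp
    rw [hs f, hs g]
    have hsum := List.sum_le_sum (l := List.range k) (f := g) (g := f)
      (fun i hi => hle i (by simp at hi; omega))
    have hk := hle k (by omega)
    have ih' := ih (fun i hi => hle i (by omega))
    constructor
    · intro hEq i hi
      have h1 : ((List.range k).map f).sum = ((List.range k).map g).sum := by omega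
      rcases Nat.lt_succ_iff_lt_or_eq.mp hi with hik | rfl
      · exact (ih'.mp h1) i hik
      · omega
    · intro hAll
      rw [ih'.mpr (fun i hi => hAll i (by omega)), hAll k (by omega)]

theorem cast_sum_map (l : List Nat) (f : Nat → Nat) :
    (l.map (fun n => ((f n : Nat) : Int))).sum = (((l.map f).sum : Nat) : Int) := by
  induction l with
  | nil => simp
  | cons a t ih => simp [ih]

theorem hasMonster_iff (tmp sm : List String) (w : Nat)
    (h0 : (tmp[0]?.getD "").length = w) :
    hasMonsterA tmp sm
    = decide (∀ i < tmp.length, ∀ j < w,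
        (sm[i]?.getD "").toList[j]?.getD ' ' = '#' → (tmp[i]?.getD "").toList[j]?.getD ' ' = '#') := by
  unfold hasMonsterA
  have hlen1 : PySem.List.len tmp = ((tmp.length : Nat) : Int) := by simp [pysem]
  have hlen2 : PySem.List.len (PySem.List.pyGetD tmp 0 "").toList = ((w : Nat) : Int) := by
    simp [pysem, h0]
  rw [hlen1, hlen2, PySem.List.pyRange_zero_natCast, PySem.List.pyRange_zero_natCast,
      List.foldl_map]
  set p : Nat → Nat → Bool := fun i j => decide ((sm[i]?.getD "").toList[j]?.getD ' ' = '#') with hp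
  set q : Nat → Nat → Bool := fun i j => decide ((tmp[i]?.getD "").toList[j]?.getD ' ' = '#') with hq
  have hstep : (fun (st : Int × Int) (i : Nat) =>
      (List.map (fun (k : Nat) => (k : Int)) (List.range w)).foldl
        (fun (st : Int × Int) j =>
          if PySem.List.pyGetD (PySem.List.pyGetD sm (i : Int) "").toList j ' ' == '#' then
            (st.1 + 1, if PySem.List.pyGetD (PySem.List.pyGetD tmp (i : Int) "").toList j ' ' == '#' then st.2 + 1 else st.2)
          else st) st)
      = fun (st : Int × Int) (i : Nat) =>
          (st.1 + ((List.range w).countP (p i) : Int),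
           st.2 + ((List.range w).countP (fun j => p i j && q i j) : Int)) := by
    funext st i
    obtain ⟨a, b⟩ := st
    rw [List.foldl_map]
    have hinner : (fun (st : Int × Int) (j : Nat) =>
        if PySem.List.pyGetD (PySem.List.pyGetD sm (i : Int) "").toList (j : Int) ' ' == '#' then
          (st.1 + 1, if PySem.List.pyGetD (PySem.List.pyGetD tmp (i : Int) "").toList (j : Int) ' ' == '#' then st.2 + 1 else st.2)
        else st)
        = fun (st : Int × Int) (j : Nat) =>
          ((fun (acc : Int) (j : Nat) => if p i j then acc + 1 else acc) st.1 j,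
           (fun (acc : Int) (j : Nat) => if p i j && q i j then acc + 1 else acc) st.2 j) := by
      funext st j
      simp only [PySem.List.pyGetD_natCast, hp, hq, List.getD_eq_getElem?_getD]
      by_cases h1 : (sm[i]?.getD "").toList[j]?.getD ' ' = '#' <;>
        by_cases h2 : (tmp[i]?.getD "").toList[j]?.getD ' ' = '#' <;>
        simp [h1, h2]
    rw [hinner, PySem.List.foldl_prod_mk
          (f := fun (acc : Int) (j : Nat) => if p i j then acc + 1 else acc)
          (g := fun (acc : Int) (j : Nat) => if p i j && q i j then acc + 1 else acc),
        PySem.List.foldl_if_add_one, PySem.List.foldl_if_add_one]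
  rw [hstep]
  rw [PySem.List.foldl_prod_mk (f := fun (a : Int) (i : Nat) => a + ((List.range w).countP (p i) : Int))
        (g := fun (a : Int) (i : Nat) => a + ((List.range w).countP (fun j => p i j && q i j) : Int)),
      PySem.List.foldl_add, PySem.List.foldl_add]
  simp only [zero_add]
  rw [cast_sum_map (List.range tmp.length) (fun i => (List.range w).countP (p i)),
      cast_sum_map (List.range tmp.length) (fun i => (List.range w).countP (fun j => p i j && q i j))]
  rw [Bool.beq_eq_decide_eq, decide_eq_decide, Int.natCast_inj]
  rw [sum_range_eq_iff _ _ _ (fun i _ => List.countP_mono_left (fun a _ h => by simp at h; exact h.1))]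
  constructor
  · intro hAll i hi j hj hpij
    have h2 := (countP_and_eq_iff (List.range w) (p i) (q i)).mp (hAll i hi) j
      (List.mem_range.mpr hj) (by simpa [hp] using hpij)
    simpa [hq] using h2
  · intro hAll i hi
    apply (countP_and_eq_iff (List.range w) (p i) (q i)).mpr
    intro j hj hpij
    simp only [hq, decide_eq_true_eq]
    exact hAll i hi j (List.mem_range.mp hj) (by simpa [hp] using hpij)

theorem single_toList (s : String) (h : s.toList.length = 1) : s.toList = [s.toList.headD ' '] := by
  match hl : s.toList, h with
  | [c], _ => rfl

theorem window_chars (row : List String) (jn wq : Nat)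
    (hcell : ∀ cell ∈ row, cell.toList.length = 1) :
    (PySem.Str.join "" (PySem.List.slice row (some (jn : Int)) (some ((jn : Int) + (wq : Int))))).toList
      = ((row.drop jn).take wq).map (fun s => s.toList.headD ' ') := by
  rw [PySem.List.slice_natCast_add]
  have hsub : ∀ s ∈ (row.drop jn).take wq, s.toList.length = 1 :=
    fun s hs => hcell s (List.mem_of_mem_drop (List.mem_of_mem_take hs))
  have hmap : ((row.drop jn).take wq).map String.toList
      = (((row.drop jn).take wq).map (fun s => s.toList.headD ' ')).map (fun c => [c]) := by
    rw [List.map_map]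
    exact List.map_congr_left (fun s hs => single_toList s (hsub s hs))
  simp only [pysem, hmap]
  rw [show ("" : String).toList = [] from rfl]
  exact PySem.Chars.join_nil_singletons _

theorem window_get (row : List String) (jn wq mn : Nat) (hm : mn < wq) (hjw : jn + wq ≤ row.length) :
    (((row.drop jn).take wq).map (fun s => s.toList.headD ' '))[mn]?.getD ' '
      = (row[jn + mn]?.getD "").toList.headD ' ' := by
  have h1 : mn < ((row.drop jn).take wq).length := by simp; omega
  have h2 : jn + mn < row.length := by omega
  rw [List.getElem?_map]
  rw [List.getElem?_eq_getElem h1, List.getElem?_eq_getElem h2]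
  simp [List.getElem_take, List.getElem_drop]

theorem single_test (s : String) (h : s.toList.length = 1) : (s == "#") = decide (s.toList.headD ' ' = '#') := by
  rw [Bool.beq_eq_decide_eq, decide_eq_decide, ← String.toList_inj]
  rcases hl : s.toList with _ | ⟨c, _ | t⟩ <;> simp_all

def Pgrid (Hn Wn : Nat) (img : List (List String)) : Prop :=
  img.length = Hn ∧ ∀ row ∈ img, Wn ≤ row.length ∧ ∀ cell ∈ row, cell.toList.length = 1

theorem foldl_pair_congr {σ α : Type} (P : σ → Prop) (l : List α) (f g : σ → α → σ)
    (h : ∀ s x, x ∈ l → P s → f s x = g s x ∧ P (g s x)) :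
    ∀ s, P s → l.foldl f s = l.foldl g s ∧ P (l.foldl g s) := by
  induction l with
  | nil => exact fun s hs => ⟨rfl, hs⟩
  | cons x t ih =>
    intro s hs
    have hx := h s x (by simp) hs
    rw [List.foldl_cons, List.foldl_cons, hx.1]
    exact ih (fun s y hy => h s y (by simp [hy])) _ hx.2

theorem Pgrid_set (Hn Wn : Nat) (img : List (List String)) (a b : Int)
    (hP : Pgrid Hn Wn img) (ha : 0 ≤ a) (hb : 0 ≤ b) :
    Pgrid Hn Wn (PySem.List.pySetD img a (PySem.List.pySetD (PySem.List.pyGetD img a []) b "O")) := by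
  obtain ⟨hlen, hrows⟩ := hP
  rw [PySem.List.pySetD_of_nonneg _ _ ha]
  by_cases hin : a.toNat < img.length
  · refine ⟨by simpa using hlen, ?_⟩
    intro row hrow
    rcases List.mem_or_eq_of_mem_set hrow with hold | rfl
    · exact hrows row hold
    · have hrowmem : PySem.List.pyGetD img a [] ∈ img := by
        rw [PySem.List.pyGetD_eq_getElem _ _ ha (by omega)]
        exact List.getElem_mem hin
      obtain ⟨hl, hc⟩ := hrows _ hrowmem
      rw [PySem.List.pySetD_of_nonneg _ _ hb]
      refine ⟨by simpa using hl, ?_⟩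
      intro cell hcell
      rcases List.mem_or_eq_of_mem_set hcell with hold | rfl
      · exact hc cell hold
      · rfl
  · rw [List.set_eq_of_length_le (by omega)]
    exact ⟨hlen, hrows⟩

theorem Pgrid_foldl_set (Hn Wn : Nat) (i j : Int) (l : List (Int × Int))
    (hl : ∀ rc ∈ l, 0 ≤ i + rc.1 ∧ 0 ≤ j + rc.2) :
    ∀ img, Pgrid Hn Wn img →
      Pgrid Hn Wn (l.foldl (fun im rc => PySem.List.pySetD im (i + rc.1)
        (PySem.List.pySetD (PySem.List.pyGetD im (i + rc.1) []) (j + rc.2) "O")) img) := by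
  induction l with
  | nil => exact fun img hP => hP
  | cons rc t ih =>
    intro img hP
    rw [List.foldl_cons]
    exact ih (fun x hx => hl x (by simp [hx]))
      _ (Pgrid_set Hn Wn img _ _ hP (hl rc (by simp)).1 (hl rc (by simp)).2)

theorem slice_self {α : Type} (xs : List α) (a : Int) : PySem.List.slice xs (some a) (some a) = [] := by
  apply List.eq_nil_of_length_eq_zero
  rw [PySem.List.length_slice]; omega

theorem search_eq_small_height (image : List (List String)) (sm : List String)
    (hin : image ≠ []) (hsn : sm ≠ []) (hHh : image.length < sm.length) :
    search_image image sm = search_image_alt image sm := by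
  simp only [search_image, search_image_alt]
  have e1 : PySem.List.pyRange 0 (PySem.List.len image - (PySem.List.len sm - 1)) 1 = [] := by
    apply pyRange_nonpos; simp [pysem]; omega
  have e2 : PySem.List.pyRange 0 (PySem.List.len image - PySem.List.len sm + 1) 1 = [] := by
    apply pyRange_nonpos; simp [pysem]; omega
  simp only [e1, e2, List.foldl_nil, PySem.List.foldl_ignore]


theorem search_eq_small_width (image : List (List String)) (sm : List String)
    (hWw : (image.getD 0 []).length < (sm.getD 0 "").toList.length) :
    search_image image sm = search_image_alt image sm := by
  simp only [search_image, search_image_alt]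
  have e1 : PySem.List.pyRange 0 (PySem.List.len (PySem.List.pyGetD image 0 []) - (PySem.Str.len (PySem.List.pyGetD sm 0 "") - 1)) 1 = [] := by
    apply pyRange_nonpos
    simp only [List.getD_eq_getElem?_getD, String.length_toList] at hWw
    simp [pysem, String.length_toList] at hWw ⊢
    omega
  have e2 : PySem.List.pyRange 0 (PySem.List.len (PySem.List.pyGetD image 0 []) - PySem.Str.len (PySem.List.pyGetD sm 0 "") + 1) 1 = [] := by
    apply pyRange_nonpos
    simp only [List.getD_eq_getElem?_getD, String.length_toList] at hWw
    simp [pysem, String.length_toList] at hWw ⊢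
    omega
  simp only [e1, List.foldl_nil, e2]

theorem search_eq_zero_width (image : List (List String)) (sm : List String)
    (hsn : sm ≠ []) (hw0 : (sm.getD 0 "").toList.length = 0) :
    search_image image sm = search_image_alt image sm := by
  simp only [search_image, search_image_alt]
  have hw0' : PySem.Str.len (PySem.List.pyGetD sm 0 "") = 0 := by
    simp only [List.getD_eq_getElem?_getD] at hw0
    simp [pysem, String.length_toList, hw0]
  simp only [hw0', zero_sub, sub_neg_eq_add, sub_zero, add_zero, slice_self]
  have hr0 : PySem.List.pyRange 0 0 1 = [] := pyRange_nonpos 0 (le_refl 0)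
  have hjoin : PySem.Str.join "" ([] : List String) = "" := rfl
  have hlensm : PySem.List.len sm = ((sm.length : Nat) : Int) := by simp [pysem]
  have htmp : (List.foldl (fun tmp l => tmp ++ [PySem.Str.join "" ([] : List String)]) []
      (PySem.List.pyRange 0 (PySem.List.len sm))) = (PySem.List.pyRange 0 (PySem.List.len sm)).map (fun _ => "") := by
    rw [PySem.List.foldl_append_singleton_eq_map]
    simp [hjoin]
  have hmon : hasMonsterA ((PySem.List.pyRange 0 (PySem.List.len sm)).map (fun _ => "")) sm = true := by
    rw [hasMonster_iff _ sm 0]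
    · simp
    · rw [hlensm, PySem.List.pyRange_zero_natCast, List.map_map]
      have h0 : 0 < sm.length := List.length_pos_iff.mpr hsn
      simp [List.getElem?_map, List.getElem?_range, h0]
  have hflat : ∀ (l : List Int), l.flatMap (fun _ => ([] : List (Int × Int))) = [] := by simp
  have hbound : PySem.List.len image - (PySem.List.len sm - 1) = PySem.List.len image - PySem.List.len sm + 1 := by ring
  simp only [htmp, hmon, hr0, List.foldl_nil, List.filter_nil, List.map_nil, hflat,
    List.all_nil, if_pos, PySem.List.foldl_ignore, hbound]

theorem search_eq_main (image : List (List String)) (sm : List String)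
    (hin : image ≠ []) (hsn : sm ≠ [])
    (hrows : ∀ row ∈ image, (image.getD 0 []).length ≤ row.length ∧ ∀ cell ∈ row, cell.toList.length = 1)
    (hsmr : ∀ s ∈ sm, (sm.getD 0 "").toList.length ≤ s.toList.length) :
    search_image image sm = search_image_alt image sm := by
  simp only [search_image, search_image_alt]
  set W := (image.getD 0 []).length with hW
  set w := (sm.getD 0 "").toList.length with hw
  set H := image.length with hH
  set h := sm.length with hh
  have hlen1 : PySem.List.len image = ((H : Nat) : Int) := by simp [pysem, hH]
  have hlen2 : PySem.List.len sm = ((h : Nat) : Int) := by simp [pysem, hh]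
  have hlen3 : PySem.List.len (PySem.List.pyGetD image 0 []) = ((W : Nat) : Int) := by
    simp [pysem, hW, List.getD_eq_getElem?_getD]
  have hlen4 : PySem.Str.len (PySem.List.pyGetD sm 0 "") = ((w : Nat) : Int) := by
    simp [pysem, hw, String.length_toList, List.getD_eq_getElem?_getD]
  have hbA : PySem.List.pyRange 0 (((W:Nat):Int) - (((w:Nat):Int) - 1)) 1 = (List.range (W + 1 - w)).map (fun (k : Nat) => (k : Int)) := by
    by_cases hc : w ≤ W + 1
    · rw [show ((W:Nat):Int) - (((w:Nat):Int) - 1) = ((W + 1 - w : Nat) : Int) by omega,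
          PySem.List.pyRange_zero_natCast]
    · rw [pyRange_nonpos _ (by omega), show W + 1 - w = 0 by omega]
      simp
  have hbB : PySem.List.pyRange 0 (((W:Nat):Int) - ((w:Nat):Int) + 1) 1 = (List.range (W + 1 - w)).map (fun (k : Nat) => (k : Int)) := by
    rw [show ((W:Nat):Int) - ((w:Nat):Int) + 1 = ((W:Nat):Int) - (((w:Nat):Int) - 1) by ring]
    exact hbA
  have hbAi : PySem.List.pyRange 0 (((H:Nat):Int) - (((h:Nat):Int) - 1)) 1 = (List.range (H + 1 - h)).map (fun (k : Nat) => (k : Int)) := by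
    by_cases hc : h ≤ H + 1
    · rw [show ((H:Nat):Int) - (((h:Nat):Int) - 1) = ((H + 1 - h : Nat) : Int) by omega,
          PySem.List.pyRange_zero_natCast]
    · rw [pyRange_nonpos _ (by omega), show H + 1 - h = 0 by omega]
      simp
  have hbBi : PySem.List.pyRange 0 (((H:Nat):Int) - ((h:Nat):Int) + 1) 1 = (List.range (H + 1 - h)).map (fun (k : Nat) => (k : Int)) := by
    rw [show ((H:Nat):Int) - ((h:Nat):Int) + 1 = ((H:Nat):Int) - (((h:Nat):Int) - 1) by ring]
    exact hbAi
  rw [hlen1, hlen2, hlen3, hlen4, hbA, hbB, hbAi, hbBi]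
  simp only [List.foldl_map]
  refine (foldl_pair_congr (fun (st : List (List String) × Int) => Pgrid H W st.1)
      _ _ _ ?_ (image, 0) ⟨hH.symm, hrows⟩).1
  intro st jn hjmem hP
  refine foldl_pair_congr (fun (st : List (List String) × Int) => Pgrid H W st.1) _ _ _ ?_ st hP
  intro st inat himem hPs
  have hjW : jn + w ≤ W := by have := List.mem_range.mp hjmem; omega
  have hiH : inat + h ≤ H := by have := List.mem_range.mp himem; omega
  obtain ⟨hPlen, hProws⟩ := hPs
  have hge1 : 1 ≤ h := by rw [hh]; exact List.length_pos_iff.mpr hsn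
  have hrowf : ∀ ln, ln < h → st.1[inat+ln]?.getD [] ∈ st.1 := by
    intro ln hln
    have hlt : inat + ln < st.1.length := by omega
    rw [List.getElem?_eq_getElem hlt]
    exact List.getElem_mem hlt
  have hcasti : ∀ ln : Nat, ((inat : Int) + (ln : Int)) = ((inat + ln : Nat) : Int) := by
    intro ln; push_cast; ring
  have hcastj : ∀ mn : Nat, ((jn : Int) + (mn : Int)) = ((jn + mn : Nat) : Int) := by
    intro mn; push_cast; ring
  have htmp : (List.foldl
      (fun tmp l => tmp ++ [PySem.Str.join ""
          (PySem.List.slice (PySem.List.pyGetD st.1 ((inat : Int) + l) []) (some (jn : Int)) (some ((jn : Int) + (w : Int))))])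
      [] (PySem.List.pyRange 0 (h : Int)))
      = (List.range h).map (fun (ln : Nat) => PySem.Str.join ""
          (PySem.List.slice (PySem.List.pyGetD st.1 ((inat : Int) + (ln : Int)) []) (some (jn : Int)) (some ((jn : Int) + (w : Int))))) := by
    rw [PySem.List.foldl_append_singleton_eq_map, List.nil_append,
        PySem.List.pyRange_zero_natCast, List.map_map]
    rfl
  rw [htmp]
  have hwin : ∀ ln, ln < h →
      (PySem.Str.join "" (PySem.List.slice (PySem.List.pyGetD st.1 ((inat : Int) + (ln : Int)) []) (some (jn : Int)) (some ((jn : Int) + (w : Int))))).toList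
        = (((st.1[inat+ln]?.getD []).drop jn).take w).map (fun s => s.toList.headD ' ') := by
    intro ln hln
    rw [hcasti ln, PySem.List.pyGetD_natCast, List.getD_eq_getElem?_getD]
    exact window_chars _ jn w (fun cell hc => ((hrowf ln hln) |> hProws _).2 cell hc)
  have hrowlen : ∀ ln, ln < h → jn + w ≤ (st.1[inat+ln]?.getD []).length := by
    intro ln hln
    have := (hProws _ (hrowf ln hln)).1
    omega
  set tmpE := (List.range h).map (fun (ln : Nat) => PySem.Str.join ""
      (PySem.List.slice (PySem.List.pyGetD st.1 ((inat : Int) + (ln : Int)) []) (some (jn : Int)) (some ((jn : Int) + (w : Int))))) with htmpE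
  have hwinlen : ∀ ln, ln < h →
      ((((st.1[inat+ln]?.getD []).drop jn).take w).map (fun s => s.toList.headD ' ')).length = w := by
    intro ln hln
    have := hrowlen ln hln
    simp
    omega
  have htmpget : ∀ i : Nat, i < h → tmpE[i]?.getD "" = PySem.Str.join ""
      (PySem.List.slice (PySem.List.pyGetD st.1 ((inat : Int) + (i : Int)) []) (some (jn : Int)) (some ((jn : Int) + (w : Int)))) := by
    intro i hi
    rw [htmpE]
    simp [List.getElem?_range, hi]
  have h0 : (tmpE[0]?.getD "").length = w := by
    rw [htmpget 0 (by omega), ← String.length_toList, hwin 0 (by omega)]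
    exact hwinlen 0 (by omega)
  have hsingle : ∀ a b : Nat, a < H → b < W → ((st.1[a]?.getD [])[b]?.getD "").toList.length = 1 := by
    intro a b ha hb
    have hlt : a < st.1.length := by omega
    have hrw : st.1[a]?.getD [] ∈ st.1 := by
      rw [List.getElem?_eq_getElem hlt]; exact List.getElem_mem hlt
    obtain ⟨hl, hc⟩ := hProws _ hrw
    have hblt : b < (st.1[a]?.getD []).length := by omega
    have hm : (st.1[a]?.getD [])[b]?.getD "" ∈ st.1[a]?.getD [] := by
      rw [List.getElem?_eq_getElem hblt]; exact List.getElem_mem hblt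
    exact hc _ hm
  have htest : ∀ rn cn : Nat, rn < h → cn < w →
      ((PySem.List.pyGetD (PySem.List.pyGetD st.1 ((inat:Int) + (rn:Int)) []) ((jn:Int) + (cn:Int)) "" == "#") = true
        ↔ ((st.1[inat+rn]?.getD [])[jn+cn]?.getD "").toList.headD ' ' = '#') := by
    intro rn cn hrn hcn
    rw [hcasti, hcastj, PySem.List.pyGetD_natCast, PySem.List.pyGetD_natCast,
        List.getD_eq_getElem?_getD, List.getD_eq_getElem?_getD,
        single_test _ (hsingle (inat+rn) (jn+cn) (by omega) (by omega))]
    simp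
  have htmpc : ∀ i j : Nat, i < h → j < w →
      (tmpE[i]?.getD "").toList[j]?.getD ' '
        = ((st.1[inat+i]?.getD [])[jn+j]?.getD "").toList.headD ' ' := by
    intro i j hi hj
    rw [htmpget i hi, hwin i hi]
    exact window_get _ jn w j hj (hrowlen i hi)
  have hlenE : tmpE.length = h := by rw [htmpE]; simp
  have hcond : hasMonsterA tmpE sm
      = ((List.flatMap (fun r => List.map (fun c => (r, c))
          (List.filter (fun c => PySem.List.pyGetD (PySem.List.pyGetD sm r "").toList c ' ' == '#')
            (PySem.List.pyRange 0 (w : Int)))) (PySem.List.pyRange 0 (h : Int))).all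
          fun rc => PySem.List.pyGetD (PySem.List.pyGetD st.1 ((inat : Int) + rc.1) []) ((jn : Int) + rc.2) "" == "#") := by
    rw [hasMonster_iff tmpE sm w h0, Bool.eq_iff_iff, decide_eq_true_eq, List.all_eq_true, hlenE]
    constructor
    · intro hA rc hrc
      simp only [List.mem_flatMap, List.mem_map, List.mem_filter, PySem.List.mem_pyRange_one] at hrc
      obtain ⟨r, ⟨hr0, hrh⟩, c, ⟨⟨hc0, hcw⟩, hpc⟩, rfl⟩ := hrc
      obtain ⟨rn, rfl⟩ : ∃ rn : Nat, r = (rn : Int) := ⟨r.toNat, (Int.toNat_of_nonneg hr0).symm⟩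
      obtain ⟨cn, rfl⟩ : ∃ cn : Nat, c = (cn : Int) := ⟨c.toNat, (Int.toNat_of_nonneg hc0).symm⟩
      have hrn : rn < h := by exact_mod_cast hrh
      have hcn : cn < w := by exact_mod_cast hcw
      rw [htest rn cn hrn hcn]
      have hsmc : (sm[rn]?.getD "").toList[cn]?.getD ' ' = '#' := by
        simp only [PySem.List.pyGetD_natCast, List.getD_eq_getElem?_getD, beq_iff_eq] at hpc
        exact hpc
      have hh2 := hA rn hrn cn hcn hsmc
      rwa [htmpc rn cn hrn hcn] at hh2
    · intro hB i hi j hj hsmc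
      rw [htmpc i j hi hj]
      have hmem : ((i : Int), (j : Int)) ∈ (List.flatMap (fun r => List.map (fun c => (r, c))
          (List.filter (fun c => PySem.List.pyGetD (PySem.List.pyGetD sm r "").toList c ' ' == '#')
            (PySem.List.pyRange 0 (w : Int)))) (PySem.List.pyRange 0 (h : Int))) := by
        simp only [List.mem_flatMap, List.mem_map, List.mem_filter, PySem.List.mem_pyRange_one]
        refine ⟨(i : Int), ⟨by omega, by exact_mod_cast hi⟩, (j : Int), ⟨⟨by omega, by exact_mod_cast hj⟩, ?_⟩, rfl⟩
        simp only [PySem.List.pyGetD_natCast, List.getD_eq_getElem?_getD, beq_iff_eq]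
        exact hsmc
      have hh2 := hB _ hmem
      rwa [htest i j hi hj] at hh2
  rw [hcond]
  by_cases hAll : ((List.flatMap (fun r => List.map (fun c => (r, c))
      (List.filter (fun c => PySem.List.pyGetD (PySem.List.pyGetD sm r "").toList c ' ' == '#')
        (PySem.List.pyRange 0 (w : Int)))) (PySem.List.pyRange 0 (h : Int))).all
      fun rc => PySem.List.pyGetD (PySem.List.pyGetD st.1 ((inat : Int) + rc.1) []) ((jn : Int) + rc.2) "" == "#") = true
  · rw [if_pos hAll, if_pos hAll]
    have hmark : (List.foldl (fun im l => List.foldl (fun im m =>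
        if (PySem.List.pyGetD (PySem.List.pyGetD sm l "").toList m ' ' == '#') = true then
          PySem.List.pySetD im ((inat : Int) + l) (PySem.List.pySetD (PySem.List.pyGetD im ((inat : Int) + l) []) ((jn : Int) + m) "O")
        else im) im (PySem.List.pyRange 0 (w : Int))) st.1 (PySem.List.pyRange 0 (h : Int)))
        = (List.foldl (fun im rc => PySem.List.pySetD im ((inat : Int) + rc.1)
            (PySem.List.pySetD (PySem.List.pyGetD im ((inat : Int) + rc.1) []) ((jn : Int) + rc.2) "O")) st.1
            (List.flatMap (fun r => List.map (fun c => (r, c))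
              (List.filter (fun c => PySem.List.pyGetD (PySem.List.pyGetD sm r "").toList c ' ' == '#')
                (PySem.List.pyRange 0 (w : Int)))) (PySem.List.pyRange 0 (h : Int)))) := by
      simp only [List.foldl_flatMap, List.foldl_map, PySem.List.foldl_if_eq_foldl_filter]
    rw [hmark]
    have hbounds : ∀ rc ∈ (List.flatMap (fun r => List.map (fun c => (r, c))
        (List.filter (fun c => PySem.List.pyGetD (PySem.List.pyGetD sm r "").toList c ' ' == '#')
          (PySem.List.pyRange 0 (w : Int)))) (PySem.List.pyRange 0 (h : Int))),
        (0 : Int) ≤ (inat : Int) + rc.1 ∧ (0 : Int) ≤ (jn : Int) + rc.2 := by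
      intro rc hrc
      simp only [List.mem_flatMap, List.mem_map, List.mem_filter, PySem.List.mem_pyRange_one] at hrc
      obtain ⟨r, ⟨hr0, _⟩, c, ⟨⟨hc0, _⟩, _⟩, rfl⟩ := hrc
      constructor <;> simp <;> omega
    exact ⟨rfl, Pgrid_foldl_set H W _ _ _ hbounds st.1 ⟨hPlen, hProws⟩⟩
  · rw [if_neg hAll, if_neg hAll]
    exact ⟨rfl, hPlen, hProws⟩

-- ===== VERDICT (by name: the statement is the Claim_ definition above) =====
theorem search_image_spec : Claim_equal_search_image := by
  intro image sm _ hpre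
  unfold Spec_search_image
  obtain ⟨hin, hsn, hsmr, hcase⟩ := hpre
  rcases hcase with hHh | hWw | hw0 | hrows
  · exact search_eq_small_height image sm hin hsn hHh
  · exact search_eq_small_width image sm hWw
  · exact search_eq_zero_width image sm hsn hw0
  · exact search_eq_main image sm hin hsn hrows hsmr
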